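-- pv_equiv track=rewrite | github.com/orjanhsy/advent | advent7_2.py | max_card
-- ===== SOURCE A (Python) =====
-- from collections import defaultdict
--
-- def max_card(hand):
--     occurances = defaultdict(int)
--     jokers = 0
--     for c in hand:
--         if c == 'J':
--             occurances[c] = 0
--             jokers += 1
--             continue
--         occurances[c] += 1
--     occurance = []
--     highest = max(occurances.values())
--     for k, v in occurances.items():
--         if v == highest:
--             del occurances[k]
--             break
--
--     second_highest = 0
--     if len(occurances.values()) > 0:
--         second_highest = max(occurances.values())
--
--     return highest + jokers, second_highest
-- ===== SOURCE B (Python) =====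
-- from collections import Counter
--
-- def max_card(hand):
--     jokers = sum(c == 'J' for c in hand)
--     counts = Counter(c for c in hand if c != 'J')
--     vals = sorted(counts.values(), reverse=True)
--     if not vals:
--         return jokers, 0
--     second = vals[1] if len(vals) > 1 else 0
--     return vals[0] + jokers, second
-- ===== Notes on version B (the rewrite author's own statement) =====
-- stated objective: simpler
-- what changed: Replaces the defaultdict loop (with a zeroed 'J' sentinel entry) plus two max-scans-with-delete by counting non-J cards once and reading the top two counts off a descending sort of the counter's values; Pre_ excludes only the empty hand, on which A raises ValueError while B returns (0, 0).
import Mathlib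
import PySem

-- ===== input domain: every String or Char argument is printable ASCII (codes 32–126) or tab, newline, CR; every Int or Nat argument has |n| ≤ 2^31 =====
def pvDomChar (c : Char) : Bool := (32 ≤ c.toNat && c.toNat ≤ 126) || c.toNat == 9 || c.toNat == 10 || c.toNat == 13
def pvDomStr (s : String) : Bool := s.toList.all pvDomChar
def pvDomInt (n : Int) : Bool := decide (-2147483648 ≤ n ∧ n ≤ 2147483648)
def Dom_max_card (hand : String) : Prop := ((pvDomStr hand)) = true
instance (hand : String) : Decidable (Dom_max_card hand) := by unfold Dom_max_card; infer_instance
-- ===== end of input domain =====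

-- B replaces A's defaultdict loop and two max-scans-with-delete by a Counter of the
-- non-J cards and a descending sort of its values; same results, simpler decomposition.

-- ===== PORT A =====
-- the body of A's 'for c in hand' loop (state = (occurances, jokers))
def pvStepA (st : PySem.Dict Char Int × Int) (c : Char) : PySem.Dict Char Int × Int :=
  if c = 'J' then (st.1.insert c 0, st.2 + 1)
  else (st.1.insert c (st.1.getD c 0 + 1), st.2)

-- A after the loop: highest = max(values) (Python raises ValueError on an empty hand —
-- excluded by Pre_); delete the first key whose value is highest; second = max of the rest or 0
def pvFinishA (occ : PySem.Dict Char Int) (jokers : Int) : Int × Int :=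
  match PySem.List.max? occ.values (fun v => v) with
  | none => (0, 0)
  | some highest =>
    let occ2 :=
      match occ.items.find? (fun kv => kv.2 == highest) with
      | some kv => occ.erase kv.1
      | none => occ
    (highest + jokers, (PySem.List.max? occ2.values (fun v => v)).getD 0)

def max_card (hand : String) : Int × Int :=
  let st := hand.toList.foldl pvStepA (PySem.Dict.empty, 0)
  pvFinishA st.1 st.2

-- ===== PORT B =====
def max_card_alt (hand : String) : Int × Int :=
  let cs := hand.toList
  let jokers : Int := (cs.map (fun c => if c = 'J' then (1 : Int) else 0)).sum
  let counts := PySem.Dict.counter (cs.filter (fun c => c ≠ 'J'))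
  let vals := PySem.List.sorted counts.values (fun v => v) true
  match vals with
  | [] => (jokers, 0)
  | v0 :: rest => (v0 + jokers, match rest with | [] => 0 | v1 :: _ => v1)

-- ===== PRECONDITION & SPEC =====
-- A raises ValueError (max of an empty sequence) exactly on the empty hand; B returns (0, 0) there.
def Pre_max_card (hand : String) : Prop := hand ≠ ""
instance (hand : String) : Decidable (Pre_max_card hand) := by unfold Pre_max_card; infer_instance
def pvWitness_max_card : String := "A2AJJ"

def Spec_max_card (hand : String) (out : Int × Int) : Prop := out = max_card_alt hand
instance (hand : String) (out : Int × Int) : Decidable (Spec_max_card hand out) := by unfold Spec_max_card; infer_instance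

-- ===== CLAIM (what is proved, stated in full; the proofs are below) =====
def Claim_equal_max_card : Prop := ∀ (hand : String), Dom_max_card hand → Pre_max_card hand → Spec_max_card hand (max_card hand)

-- ===== LEMMAS AND PROOFS =====

-- the second component of A's loop state counts the jokers
lemma pvFoldA_snd (l : List Char) (s : PySem.Dict Char Int × Int) :
    (l.foldl pvStepA s).2 = s.2 + l.count 'J' := by
  induction l generalizing s with
  | nil => simp
  | cons c t ih =>
    rw [List.foldl_cons, ih]
    simp only [pvStepA]
    split_ifs with hc
    · subst hc
      simp [List.count_cons]
      push_cast
      ring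
    · simp [List.count_cons, hc]

-- A's dict holds the plain count at every non-'J' key …
lemma pvFoldA_getD_ne (l : List Char) (s : PySem.Dict Char Int × Int) (k : Char) (hk : k ≠ 'J') :
    (l.foldl pvStepA s).1.getD k 0 = s.1.getD k 0 + l.count k := by
  induction l generalizing s with
  | nil => simp
  | cons c t ih =>
    rw [List.foldl_cons]
    by_cases hc : c = 'J'
    · subst hc
      rw [show pvStepA s 'J' = (s.1.insert 'J' 0, s.2 + 1) from by simp [pvStepA], ih]
      rw [show ((s.1.insert 'J' 0 : PySem.Dict Char Int)).getD k 0 = s.1.getD k 0 from by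
        rw [PySem.Dict.getD_insert]; exact if_neg hk]
      rw [List.count_cons, if_neg (by simpa using fun h => hk h.symm)]
      simp
    · rw [show pvStepA s c = (s.1.insert c (s.1.getD c 0 + 1), s.2) from by simp [pvStepA, hc], ih]
      rw [PySem.Dict.getD_insert]
      by_cases hkc : k = c
      · subst hkc
        rw [if_pos rfl, List.count_cons, if_pos (by simp)]
        push_cast
        ring
      · rw [if_neg hkc, List.count_cons, if_neg (by simpa using fun h => hkc h.symm)]
        simp

-- … and 0 at 'J' once a joker was seen
lemma pvFoldA_getD_J (l : List Char) (s : PySem.Dict Char Int × Int) :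
    (l.foldl pvStepA s).1.getD 'J' 0 = if 'J' ∈ l then 0 else s.1.getD 'J' 0 := by
  induction l generalizing s with
  | nil => simp
  | cons c t ih =>
    rw [List.foldl_cons]
    by_cases hc : c = 'J'
    · subst hc
      rw [show pvStepA s 'J' = (s.1.insert 'J' 0, s.2 + 1) from by simp [pvStepA], ih]
      by_cases hm : 'J' ∈ t
      · simp [hm]
      · simp [hm, PySem.Dict.getD_insert]
    · have hne : ('J' : Char) ≠ c := fun h => hc h.symm
      rw [show pvStepA s c = (s.1.insert c (s.1.getD c 0 + 1), s.2) from by simp [pvStepA, hc], ih]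
      simp only [PySem.Dict.getD_insert, if_neg hne]
      by_cases hm : 'J' ∈ t
      · simp [hm]
      · simp [hm, List.mem_cons, hne]

lemma pvFoldA_keys (l : List Char) (s : PySem.Dict Char Int × Int) :
    (l.foldl pvStepA s).1.keys = PySem.Set.update s.1.keys l := by
  induction l generalizing s with
  | nil => simp [PySem.Set.update_nil]
  | cons c t ih =>
    have hstep : ∀ (d : PySem.Dict Char Int) (v : Int), (d.insert c v).keys = PySem.Set.add d.keys c := by
      intro d v
      by_cases hm : c ∈ d.keys
      · rw [PySem.Dict.keys_insert_of_contains d v ((PySem.Dict.contains_iff_mem_keys d c).2 hm),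
          PySem.Set.add_of_mem hm]
      · have hcf : d.contains c = false := by
          cases h : d.contains c
          · rfl
          · exact absurd ((PySem.Dict.contains_iff_mem_keys d c).1 h) hm
        rw [PySem.Dict.keys_insert_of_not_contains d v hcf, PySem.Set.add_of_not_mem hm]
    rw [List.foldl_cons, ih, PySem.Set.update_cons]
    simp only [pvStepA]
    split_ifs with hc
    · subst hc
      simp [hstep]
    · simp [hstep]

-- the first extremal element of a list of ints is any member that dominates
lemma pvMaxVal (l : List Int) (m : Int) (hm : m ∈ l) (hmax : ∀ y ∈ l, y ≤ m) :
    PySem.List.max? l (fun v => v) = some m := by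
  cases e : PySem.List.max? l (fun v => v) with
  | none =>
    rw [PySem.List.max?_eq_none_iff] at e
    subst e; cases hm
  | some h =>
    have h1 : h ∈ l := PySem.List.max?_mem e
    have h2 : m ≤ h := PySem.List.max?_isMax e m hm
    exact congrArg some (le_antisymm (hmax h h1) h2)

-- deleting the first key whose value is h removes the first occurrence of h from the values
lemma pvValuesErase (l : List (Char × Int)) (h : Int) (kv : Char × Int)
    (hnd : (l.map Prod.fst).Nodup)
    (hf : l.find? (fun q => q.2 == h) = some kv) :
    ((l.filter (fun p => !(p.1 == kv.1))).map Prod.snd) = (l.map Prod.snd).erase h := by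
  induction l with
  | nil => cases hf
  | cons p t ih =>
    simp only [List.map_cons, List.nodup_cons] at hnd
    by_cases hp : p.2 = h
    · rw [List.find?_cons_of_pos (by simp [hp])] at hf
      have hkv : kv = p := (Option.some_inj.mp hf).symm
      subst hkv
      have ht : t.filter (fun q : Char × Int => !(q.1 == kv.1)) = t := by
        apply List.filter_eq_self.2
        intro q hq
        simp only [Bool.not_eq_eq_eq_not, Bool.not_true, beq_eq_false_iff_ne, ne_eq]
        intro hq1
        exact hnd.1 (hq1 ▸ List.mem_map_of_mem hq)
      rw [List.filter_cons_of_neg (by simp), ht, List.map_cons, hp, List.erase_cons_head]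
    · rw [List.find?_cons_of_neg (by simp [hp])] at hf
      have hkvmem : kv ∈ t := List.mem_of_find?_eq_some hf
      have hkvne : p.1 ≠ kv.1 := by
        intro hcon
        exact hnd.1 (hcon ▸ List.mem_map_of_mem hkvmem)
      rw [List.filter_cons_of_pos (by simp [hkvne]), List.map_cons, List.map_cons,
        List.erase_cons_tail (by simp [hp]), ih hnd.2 hf]

-- computes A on the all-joker tail: the dict stays {'J': 0}
lemma pvAllJ (l : List Char) (hall : ∀ c ∈ l, c = 'J') (j : Int) :
    l.foldl pvStepA (PySem.Dict.mk [('J', 0)], j) = (PySem.Dict.mk [('J', 0)], j + l.length) := by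
  induction l generalizing j with
  | nil => simp
  | cons c t ih =>
    have hc : c = 'J' := hall c (by simp)
    subst hc
    have hins : (PySem.Dict.mk [('J', (0 : Int))]).insert 'J' 0 = PySem.Dict.mk [('J', 0)] := by
      apply PySem.Dict.ext
      rw [PySem.Dict.items_insert_of_contains _ _ (by rfl)]
      rfl
    rw [List.foldl_cons, show pvStepA (PySem.Dict.mk [('J', (0:Int))], j) 'J'
        = (PySem.Dict.mk [('J', (0:Int))], j + 1) from by simp [pvStepA, hins],
      ih (fun c hc => hall c (by simp [hc]))]
    simp
    push_cast
    ring

-- the values of Counter(cs') as counts over the distinct elements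
lemma pvCounterValues (cs' : List Char) :
    (PySem.Dict.counter cs').values = (PySem.Set.ofList cs').map (fun k => (cs'.count k : Int)) := by
  have h : (PySem.Dict.counter cs').values = (PySem.Dict.counter cs').items.map Prod.snd := rfl
  rw [h, PySem.Dict.items_counter, List.map_map]
  rfl

-- the main equivalence, stated over the character list
lemma pvMainList (cs : List Char) (hne : cs ≠ []) :
    pvFinishA (cs.foldl pvStepA (PySem.Dict.empty, 0)).1 (cs.foldl pvStepA (PySem.Dict.empty, 0)).2
      = (match PySem.List.sorted (PySem.Dict.counter (cs.filter (fun c => c ≠ 'J'))).values (fun v => v) true with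
         | [] => ((cs.map fun c => if c = 'J' then (1 : Int) else 0).sum, 0)
         | v0 :: rest => (v0 + (cs.map fun c => if c = 'J' then (1 : Int) else 0).sum,
             match rest with | [] => 0 | v1 :: _ => v1)) := by
  have hjok : (cs.map fun c => if c = 'J' then (1 : Int) else 0).sum = (cs.count 'J' : Int) := by
    rw [show (fun c => if c = 'J' then (1 : Int) else 0)
        = (fun c => if (c == 'J') then (1 : Int) else 0) from by funext c; simp]
    rw [PySem.List.sum_map_ite_one_zero]
    simp [List.count]
  have hsnd : (cs.foldl pvStepA (PySem.Dict.empty, 0)).2 = (cs.count 'J' : Int) := by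
    rw [pvFoldA_snd]; simp
  have hkeys : (cs.foldl pvStepA (PySem.Dict.empty, 0)).1.keys = PySem.Set.ofList cs := by
    rw [pvFoldA_keys]
    show PySem.Set.update (PySem.Dict.empty : PySem.Dict Char Int).keys cs = _
    rw [PySem.Dict.keys_empty]
    exact PySem.Set.update_nil_left cs
  have hnd : (cs.foldl pvStepA (PySem.Dict.empty, 0)).1.keys.Nodup := by
    rw [hkeys]; exact PySem.Set.nodup_ofList cs
  have hgetD : ∀ k ∈ PySem.Set.ofList cs,
      (cs.foldl pvStepA (PySem.Dict.empty, 0)).1.getD k 0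
        = (if k = 'J' then (0 : Int) else (cs.count k : Int)) := by
    intro k hk
    by_cases hkJ : k = 'J'
    · subst hkJ
      rw [pvFoldA_getD_J]
      simp [(PySem.Set.mem_ofList cs 'J').1 hk]
    · rw [pvFoldA_getD_ne _ _ _ hkJ]
      simp [hkJ, PySem.Dict.getD_empty]
  have hitems : (cs.foldl pvStepA (PySem.Dict.empty, 0)).1.items
      = (PySem.Set.ofList cs).map (fun k => (k, if k = 'J' then (0 : Int) else (cs.count k : Int))) := by
    rw [PySem.Dict.items_eq_map_keys _ hnd 0, hkeys]
    exact List.map_congr_left (fun k hk => by rw [hgetD k hk])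
  have hvalues : (cs.foldl pvStepA (PySem.Dict.empty, 0)).1.values
      = (PySem.Set.ofList cs).map (fun k => if k = 'J' then (0 : Int) else (cs.count k : Int)) := by
    rw [show (cs.foldl pvStepA (PySem.Dict.empty, 0)).1.values
        = (cs.foldl pvStepA (PySem.Dict.empty, 0)).1.items.map Prod.snd from rfl, hitems, List.map_map]
    rfl
  have hvalB : (PySem.Dict.counter (cs.filter (fun c => c ≠ 'J'))).values
      = (PySem.Set.ofList (cs.filter (fun c => c ≠ 'J'))).map
          (fun k => if k = 'J' then (0 : Int) else (cs.count k : Int)) := by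
    rw [pvCounterValues]
    refine List.map_congr_left (fun k hk => ?_)
    have hk' : k ∈ cs.filter (fun c => c ≠ 'J') := (PySem.Set.mem_ofList _ k).1 hk
    have hkne : k ≠ 'J' := by simpa using (List.mem_filter.mp hk').2
    rw [if_neg hkne, List.count_filter (by simpa using hkne)]
  have hmemks' : ∀ k, k ∈ PySem.Set.ofList (cs.filter (fun c => c ≠ 'J')) ↔ (k ∈ cs ∧ k ≠ 'J') := by
    intro k
    rw [PySem.Set.mem_ofList, List.mem_filter]
    simp
  have hpos : ∀ v ∈ (PySem.Set.ofList (cs.filter (fun c => c ≠ 'J'))).map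
      (fun k => if k = 'J' then (0 : Int) else (cs.count k : Int)), 1 ≤ v := by
    intro v hv
    obtain ⟨k, hk, rfl⟩ := List.mem_map.mp hv
    obtain ⟨hkcs, hkne⟩ := (hmemks' k).1 hk
    rw [if_neg hkne]
    have : 0 < cs.count k := List.count_pos_iff.2 hkcs
    exact_mod_cast this
  have hvperm : (cs.foldl pvStepA (PySem.Dict.empty, 0)).1.values.Perm
      ((if 'J' ∈ cs then [(0 : Int)] else [])
        ++ (PySem.Set.ofList (cs.filter (fun c => c ≠ 'J'))).map
            (fun k => if k = 'J' then (0 : Int) else (cs.count k : Int))) := by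
    rw [hvalues]
    by_cases hJ : 'J' ∈ cs
    · have hnotmem : ('J' : Char) ∉ PySem.Set.ofList (cs.filter (fun c => c ≠ 'J')) := by
        intro hcon
        exact ((hmemks' 'J').1 hcon).2 rfl
      have hkperm : (PySem.Set.ofList cs).Perm
          ('J' :: PySem.Set.ofList (cs.filter (fun c => c ≠ 'J'))) := by
        rw [List.perm_ext_iff_of_nodup (PySem.Set.nodup_ofList cs)
          (List.nodup_cons.2 ⟨hnotmem, PySem.Set.nodup_ofList _⟩)]
        intro a
        rw [PySem.Set.mem_ofList, List.mem_cons, hmemks' a]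
        constructor
        · intro ha
          by_cases haJ : a = 'J'
          · exact Or.inl haJ
          · exact Or.inr ⟨ha, haJ⟩
        · rintro (rfl | ⟨ha, _⟩)
          · exact hJ
          · exact ha
      have := hkperm.map (fun k => if k = 'J' then (0 : Int) else (cs.count k : Int))
      simpa [hJ] using this
    · have hkperm : (PySem.Set.ofList cs).Perm (PySem.Set.ofList (cs.filter (fun c => c ≠ 'J'))) := by
        rw [List.perm_ext_iff_of_nodup (PySem.Set.nodup_ofList cs) (PySem.Set.nodup_ofList _)]
        intro a
        rw [PySem.Set.mem_ofList, hmemks' a]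
        constructor
        · intro ha
          exact ⟨ha, fun hcon => hJ (hcon ▸ ha)⟩
        · exact fun h => h.1
      have := hkperm.map (fun k => if k = 'J' then (0 : Int) else (cs.count k : Int))
      simpa [hJ] using this
  cases hv : PySem.List.sorted (PySem.Dict.counter (cs.filter (fun c => c ≠ 'J'))).values (fun v => v) true with
  | nil =>
    have hperm0 := PySem.List.sorted_perm (PySem.Dict.counter (cs.filter (fun c => c ≠ 'J'))).values (fun v => v) true
    rw [hv, hvalB] at hperm0
    have hBnil : (PySem.Set.ofList (cs.filter (fun c => c ≠ 'J'))).map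
        (fun k => if k = 'J' then (0 : Int) else (cs.count k : Int)) = [] :=
      List.perm_nil.mp hperm0.symm
    have hallJ : ∀ c ∈ cs, c = 'J' := by
      intro c hc
      by_contra hcJ
      have hcmem : c ∈ PySem.Set.ofList (cs.filter (fun c => c ≠ 'J')) := (hmemks' c).2 ⟨hc, hcJ⟩
      have : (if c = 'J' then (0:Int) else (cs.count c : Int))
          ∈ (PySem.Set.ofList (cs.filter (fun c => c ≠ 'J'))).map
            (fun k => if k = 'J' then (0 : Int) else (cs.count k : Int)) := List.mem_map_of_mem hcmem
      rw [hBnil] at this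
      cases this
    obtain ⟨c, t, rfl⟩ : ∃ c t, cs = c :: t := by
      cases cs with
      | nil => exact absurd rfl hne
      | cons c t => exact ⟨c, t, rfl⟩
    have hcJ : c = 'J' := hallJ c (by simp)
    subst hcJ
    have hfold : ('J' :: t).foldl pvStepA (PySem.Dict.empty, 0)
        = (PySem.Dict.mk [('J', (0 : Int))], (1 + (t.length : Int) : Int)) := by
      rw [List.foldl_cons,
        show pvStepA (PySem.Dict.empty, (0 : Int)) 'J' = (PySem.Dict.mk [('J', (0 : Int))], (1 : Int)) from by
          simp [pvStepA]; rfl,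
        pvAllJ t (fun c hc => hallJ c (by simp [hc])) 1]
    rw [hfold]
    show ((0 : Int) + (1 + (t.length : Int)), (0 : Int)) = _
    have htc : t.count 'J' = t.length := List.count_eq_length.2 (fun c hc => by
      have := hallJ c (by simp [hc]); simp [this])
    rw [hjok]
    simp [List.count_cons, htc]
    push_cast
    ring
  | cons v0 rest =>
    have hsp : (v0 :: rest).Perm ((PySem.Set.ofList (cs.filter (fun c => c ≠ 'J'))).map
        (fun k => if k = 'J' then (0 : Int) else (cs.count k : Int))) := by
      have := PySem.List.sorted_perm (PySem.Dict.counter (cs.filter (fun c => c ≠ 'J'))).values (fun v => v) true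
      rw [hv, hvalB] at this
      exact this
    have hv0mem : v0 ∈ (PySem.Set.ofList (cs.filter (fun c => c ≠ 'J'))).map
        (fun k => if k = 'J' then (0 : Int) else (cs.count k : Int)) := hsp.subset (by simp)
    have hdom : ∀ y ∈ (PySem.Set.ofList (cs.filter (fun c => c ≠ 'J'))).map
        (fun k => if k = 'J' then (0 : Int) else (cs.count k : Int)), y ≤ v0 := by
      intro y hy
      exact PySem.List.key_head_sorted_rev_ge _ (fun v => v) hv y (by rw [hvalB]; exact hy)
    have hv0pos : (1 : Int) ≤ v0 := hpos v0 hv0mem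
    have hmaxA : PySem.List.max? (cs.foldl pvStepA (PySem.Dict.empty, 0)).1.values (fun v => v) = some v0 := by
      apply pvMaxVal
      · exact hvperm.mem_iff.2 (List.mem_append_right _ hv0mem)
      · intro y hy
        rcases List.mem_append.mp (hvperm.mem_iff.1 hy) with h0 | hB
        · have hy0 : y = 0 := by
            by_cases hJ : 'J' ∈ cs
            · simpa [hJ] using h0
            · simp [hJ] at h0
          omega
        · exact hdom y hB
    have hv0val : v0 ∈ (cs.foldl pvStepA (PySem.Dict.empty, 0)).1.items.map Prod.snd := by
      rw [show (cs.foldl pvStepA (PySem.Dict.empty, 0)).1.items.map Prod.snd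
          = (cs.foldl pvStepA (PySem.Dict.empty, 0)).1.values from rfl]
      exact hvperm.mem_iff.2 (List.mem_append_right _ hv0mem)
    obtain ⟨kv, hkv⟩ : ∃ kv, (cs.foldl pvStepA (PySem.Dict.empty, 0)).1.items.find?
        (fun kv => kv.2 == v0) = some kv := by
      obtain ⟨p, hp, hp2⟩ := List.mem_map.mp hv0val
      have hex : ∃ x ∈ (cs.foldl pvStepA (PySem.Dict.empty, 0)).1.items,
          (fun kv : Char × Int => kv.2 == v0) x = true := ⟨p, hp, by simp [hp2]⟩
      obtain ⟨kv, hkv⟩ := Option.isSome_iff_exists.mp (List.find?_isSome.mpr hex)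
      exact ⟨kv, hkv⟩
    have hndf : ((cs.foldl pvStepA (PySem.Dict.empty, 0)).1.items.map Prod.fst).Nodup := by
      exact hnd
    have hErase : ((cs.foldl pvStepA (PySem.Dict.empty, 0)).1.erase kv.1).values
        = (cs.foldl pvStepA (PySem.Dict.empty, 0)).1.values.erase v0 :=
      pvValuesErase _ v0 kv hndf hkv
    have hperm2 : ((cs.foldl pvStepA (PySem.Dict.empty, 0)).1.values.erase v0).Perm
        ((if 'J' ∈ cs then [(0 : Int)] else []) ++ rest) := by
      have h1 := List.Perm.erase v0 hvperm
      rw [List.erase_append_right _ (by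
        by_cases hJ : 'J' ∈ cs <;> simp [hJ]
        omega)] at h1
      have h2 := List.Perm.erase v0 hsp.symm
      rw [List.erase_cons_head] at h2
      exact h1.trans (h2.append_left _)
    cases rest with
    | nil =>
      have hsecond : PySem.List.max? ((cs.foldl pvStepA (PySem.Dict.empty, 0)).1.values.erase v0)
          (fun v => v) = none ∨ PySem.List.max? ((cs.foldl pvStepA (PySem.Dict.empty, 0)).1.values.erase v0)
          (fun v => v) = some 0 := by
        by_cases hJ : 'J' ∈ cs
        · right
          have : ((cs.foldl pvStepA (PySem.Dict.empty, 0)).1.values.erase v0).Perm [(0:Int)] := by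
            simpa [hJ] using hperm2
          rw [List.perm_singleton.mp this]
          rfl
        · left
          have : ((cs.foldl pvStepA (PySem.Dict.empty, 0)).1.values.erase v0).Perm [] := by
            simpa [hJ] using hperm2
          rw [List.perm_nil.mp this]
          rfl
      unfold pvFinishA
      rw [hmaxA]
      simp only [hkv]
      rw [hErase, hsnd, hjok]
      rcases hsecond with h | h <;> rw [h] <;> rfl
    | cons v1 rest' =>
      have hpw := PySem.List.sorted_pairwise_rev (PySem.Dict.counter (cs.filter (fun c => c ≠ 'J'))).values (fun v => v)
      rw [hv] at hpw
      have hrest : ∀ y ∈ v1 :: rest', y ≤ v1 := by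
        intro y hy
        rcases List.mem_cons.mp hy with rfl | hy'
        · exact le_refl y
        · exact ((List.pairwise_cons.mp (List.pairwise_cons.mp hpw).2).1 y hy')
      have hv1pos : (1 : Int) ≤ v1 := hpos v1 (hsp.subset (by simp))
      have hsecond : PySem.List.max? ((cs.foldl pvStepA (PySem.Dict.empty, 0)).1.values.erase v0)
          (fun v => v) = some v1 := by
        apply pvMaxVal
        · exact hperm2.mem_iff.2 (List.mem_append_right _ (by simp))
        · intro y hy
          rcases List.mem_append.mp (hperm2.mem_iff.1 hy) with h0 | hB
          · have hy0 : y = 0 := by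
              by_cases hJ : 'J' ∈ cs
              · simpa [hJ] using h0
              · simp [hJ] at h0
            omega
          · exact hrest y hB
      unfold pvFinishA
      rw [hmaxA]
      simp only [hkv]
      rw [hErase, hsnd, hjok, hsecond]
      rfl

lemma pvMain (hand : String) (hne : hand.toList ≠ []) :
    max_card hand = max_card_alt hand := by
  unfold max_card max_card_alt
  exact pvMainList hand.toList hne

-- ===== VERDICT (by name: the statement is the Claim_ definition above) =====
theorem max_card_spec : Claim_equal_max_card := by
  intro hand _ hpre
  unfold Spec_max_card
  have hne : hand.toList ≠ [] := by
    intro h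
    apply hpre
    have := congrArg String.ofList h
    simpa using this
  exact pvMain hand hne
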